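-- pv_equiv track=rewrite | github.com/helena128/ktop-lab3 | lab.py | create_alpha_matrix
-- ===== SOURCE A (Python) =====
-- def create_alpha_matrix(phis):
--   alpha_matrix = [[0 for x in range(len(phis))] for y in range(len(phis))]
--   for row_idx1 in range(0, len(phis)):
--     phi_row1 = phis[row_idx1]
--     for row_idx2 in range(row_idx1 + 1, len(phis)):
--       phi_row2 = phis[row_idx2]
--       cur_alpha = len(phi_row1) + len(phi_row2) - len(list(set(phi_row1) & set(phi_row2)))
--       alpha_matrix[row_idx1][row_idx2] = cur_alpha
--       alpha_matrix[row_idx2][row_idx1] = cur_alpha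
--   return alpha_matrix
-- ===== SOURCE B (Python) =====
-- def _pairs(rows):
--     if not rows:
--         return []
--     head, tail = rows[0], rows[1:]
--     return [(head, j) for j in tail] + _pairs(tail)
--
-- def create_alpha_matrix(phis):
--     n = len(phis)
--     # inverted index: value -> sorted list of row indices containing it
--     index = {}
--     for i, row in enumerate(phis):
--         for v in dict.fromkeys(row):
--             index.setdefault(v, []).append(i)
--     # co-occurrence counts: (i, j) with i < j -> number of shared distinct values
--     inter = {}
--     for rows in index.values():
--         for p in _pairs(rows):
--             inter[p] = inter.get(p, 0) + 1
--     lens = [len(row) for row in phis]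
--     return [[0 if i == j else lens[i] + lens[j] - inter.get((min(i, j), max(i, j)), 0)
--              for j in range(n)]
--             for i in range(n)]
-- ===== Notes on version B (the rewrite author's own statement) =====
-- stated objective: alternative
-- what changed: Replaces A's pairwise double loop with per-pair set intersections by an inverted index (value -> rows containing it) whose co-occurring row pairs are counted into a sparse dictionary; each cell is then lens[i]+lens[j] minus the counted co-occurrence, with no set intersection ever computed.
import Mathlib
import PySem

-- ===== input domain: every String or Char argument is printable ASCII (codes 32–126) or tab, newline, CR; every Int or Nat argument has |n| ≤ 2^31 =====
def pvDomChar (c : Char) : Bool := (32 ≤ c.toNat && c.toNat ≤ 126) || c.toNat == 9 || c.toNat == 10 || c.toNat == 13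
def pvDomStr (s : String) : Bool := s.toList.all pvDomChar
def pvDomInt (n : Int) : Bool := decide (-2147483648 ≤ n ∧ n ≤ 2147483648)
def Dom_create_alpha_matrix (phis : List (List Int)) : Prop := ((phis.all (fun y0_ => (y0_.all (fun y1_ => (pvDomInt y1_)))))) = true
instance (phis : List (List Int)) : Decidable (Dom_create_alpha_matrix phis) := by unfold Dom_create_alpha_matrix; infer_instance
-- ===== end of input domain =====

-- B replaces A's pairwise double loop (a set intersection per pair) by an inverted index
-- value -> rows, whose co-occurring row pairs are counted into a sparse dictionary; each
-- cell is then lens[i] + lens[j] - co-occurrence count (alternative algorithm, same value).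

-- ===== PORT A =====
-- alpha_matrix[i][j] = v : the row is fetched, mutated at j, and written back
def matSet2 (m : List (List Int)) (i j : Nat) (v : Int) : List (List Int) :=
  m.set i ((m.getD i []).set j v)

def create_alpha_matrix (phis : List (List Int)) : List (List Int) :=
  let n := phis.length
  let init := (List.range n).map (fun _ => (List.range n).map (fun _ => (0 : Int)))
  (List.range n).foldl
    (fun m row_idx1 =>
      let phi_row1 := phis.getD row_idx1 []
      (List.range' (row_idx1 + 1) (n - (row_idx1 + 1))).foldl
        (fun m row_idx2 =>
          let phi_row2 := phis.getD row_idx2 []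
          let cur_alpha : Int := (phi_row1.length : Int) + (phi_row2.length : Int) -
            ((PySem.Set.inter (PySem.Set.ofList phi_row1) (PySem.Set.ofList phi_row2)).length : Int)
          matSet2 (matSet2 m row_idx1 row_idx2 cur_alpha) row_idx2 row_idx1 cur_alpha)
        m)
    init

-- ===== PORT B =====
-- _pairs(rows): all ordered pairs (rows[a], rows[b]), a < b, by structural recursion as in Source B
def pvPairs (rows : List Nat) : List (Nat × Nat) :=
  match rows with
  | [] => []
  | head :: tail => tail.map (fun j => (head, j)) ++ pvPairs tail

-- one step of the index loop: 'for v in dict.fromkeys(row): index.setdefault(v, []).append(i)'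
def pvIndexRow (d : PySem.Dict Int (List Nat)) (pr : List Int × Nat) : PySem.Dict Int (List Nat) :=
  (PySem.List.dedup pr.1).foldl (fun d v => d.insert v (d.getD v [] ++ [pr.2])) d

-- 'for i, row in enumerate(phis): …' (row indices kept as Nat)
def pvIndex (phis : List (List Int)) : PySem.Dict Int (List Nat) :=
  phis.zipIdx.foldl pvIndexRow PySem.Dict.empty

-- 'for rows in index.values(): for p in _pairs(rows): inter[p] = inter.get(p, 0) + 1'
def pvInter (vals : List (List Nat)) : PySem.Dict (Nat × Nat) Int :=
  vals.foldl
    (fun d rows => (pvPairs rows).foldl (fun d p => d.insert p (d.getD p 0 + 1)) d)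
    PySem.Dict.empty

def create_alpha_matrix_alt (phis : List (List Int)) : List (List Int) :=
  let n := phis.length
  let index := pvIndex phis
  let inter := pvInter index.values
  let lens := phis.map (fun row => (row.length : Int))
  (List.range n).map (fun i =>
    (List.range n).map (fun j =>
      if i = j then 0
      else lens.getD i 0 + lens.getD j 0 - inter.getD (min i j, max i j) 0))

-- ===== PRECONDITION & SPEC =====
def Spec_create_alpha_matrix (phis : List (List Int)) (out : List (List Int)) : Prop := out = create_alpha_matrix_alt phis
instance (phis : List (List Int)) (out : List (List Int)) : Decidable (Spec_create_alpha_matrix phis out) := by unfold Spec_create_alpha_matrix; infer_instance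

-- ===== CLAIM (what is proved, stated in full; the proofs are below) =====
def Claim_equal_create_alpha_matrix : Prop := ∀ (phis : List (List Int)), Dom_create_alpha_matrix phis → Spec_create_alpha_matrix phis (create_alpha_matrix phis)

-- ===== LEMMAS AND PROOFS =====

-- a matrix as a function on index pairs
def mat (n : Nat) (g : Nat → Nat → Int) : List (List Int) :=
  (List.range n).map (fun i => (List.range n).map (g i))

-- the per-pair value A computes
def fA (phis : List (List Int)) (i j : Nat) : Int :=
  ((phis.getD i []).length : Int) + ((phis.getD j []).length : Int) -
    ((PySem.Set.inter (PySem.Set.ofList (phis.getD i [])) (PySem.Set.ofList (phis.getD j []))).length : Int)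

def updg (g : Nat → Nat → Int) (i j : Nat) (v : Int) : Nat → Nat → Int :=
  fun a b => if a = i ∧ b = j then v else g a b

-- the functional version of one inner-loop step of A
def stepg (phis : List (List Int)) (i : Nat) (g : Nat → Nat → Int) (j : Nat) : Nat → Nat → Int :=
  updg (updg g i j (fA phis i j)) j i (fA phis i j)

lemma set_map_range {α : Type} (n : Nat) (f : Nat → α) (j : Nat) (v : α) :
    ((List.range n).map f).set j v = (List.range n).map (fun b => if b = j then v else f b) := by
  apply List.ext_getElem
  · simp
  · intro k h1 h2
    simp only [List.length_map, List.length_range] at h1 h2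
    rw [List.getElem_set, List.getElem_map, List.getElem_map, List.getElem_range]
    split_ifs <;> first | rfl | omega

lemma getD_mat (n : Nat) (g : Nat → Nat → Int) (i : Nat) (hi : i < n) :
    (mat n g).getD i [] = (List.range n).map (g i) := by
  unfold mat
  rw [List.getD_eq_getElem?_getD, List.getElem?_map, List.getElem?_range hi]
  rfl

lemma matSet2_mat (n : Nat) (g : Nat → Nat → Int) (i j : Nat) (hi : i < n) (v : Int) :
    matSet2 (mat n g) i j v = mat n (updg g i j v) := by
  unfold matSet2
  rw [getD_mat n g i hi, set_map_range]
  unfold mat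
  rw [set_map_range]
  apply List.map_congr_left
  intro a ha
  simp only [List.mem_range] at ha
  by_cases h : a = i
  · subst h
    rw [if_pos rfl]
    apply List.map_congr_left
    intro b hb
    simp [updg]
  · simp only [if_neg h]
    apply List.map_congr_left
    intro b hb
    simp [updg, h]

lemma mat_congr (n : Nat) (g h : Nat → Nat → Int)
    (H : ∀ a b, a < n → b < n → g a b = h a b) : mat n g = mat n h := by
  unfold mat
  apply List.map_congr_left
  intro a ha
  simp only [List.mem_range] at ha
  apply List.map_congr_left
  intro b hb
  simp only [List.mem_range] at hb
  exact H a b ha hb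

lemma inner_fold_mat (phis : List (List Int)) (n i : Nat) (hi : i < n) :
    ∀ (L : List Nat), (∀ j ∈ L, j < n) → ∀ (g : Nat → Nat → Int),
      L.foldl (fun m j =>
          matSet2 (matSet2 m i j (fA phis i j)) j i (fA phis i j)) (mat n g)
        = mat n (L.foldl (stepg phis i) g) := by
  intro L
  induction L with
  | nil => intro _ g; rfl
  | cons j L ih =>
    intro hL g
    simp only [List.foldl_cons]
    rw [matSet2_mat n g i j hi, matSet2_mat n _ j i (hL j (by simp)),
        ih (fun x hx => hL x (by simp [hx]))]
    rfl

lemma stepg_apply (phis : List (List Int)) (i : Nat) (g : Nat → Nat → Int) (j a b : Nat) :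
    stepg phis i g j a b =
      if a = j ∧ b = i then fA phis i j
      else if a = i ∧ b = j then fA phis i j else g a b := by
  simp [stepg, updg]

lemma inner_char (phis : List (List Int)) (i : Nat) :
    ∀ (t : Nat) (g : Nat → Nat → Int) (a b : Nat),
      ((List.range' (i + 1) t).foldl (stepg phis i) g) a b =
        if a = i ∧ i < b ∧ b < i + 1 + t then fA phis i b
        else if b = i ∧ i < a ∧ a < i + 1 + t then fA phis i a
        else g a b := by
  intro t
  induction t with
  | zero => intro g a b; simp only [List.range'_zero, List.foldl_nil]; split_ifs <;> first | rfl | omega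
  | succ t ih =>
    intro g a b
    rw [List.range'_concat, List.foldl_append]
    simp only [List.foldl_cons, List.foldl_nil, one_mul]
    rw [stepg_apply, ih]
    split_ifs <;>
      first
        | rfl
        | omega
        | (rename_i hh _ _; obtain ⟨rfl, -⟩ := hh; rfl)
        | (rename_i hh _; obtain ⟨rfl, -⟩ := hh; first | rfl | omega)
        | (rename_i hh _; obtain ⟨-, rfl⟩ := hh; first | rfl | omega)

-- |set(x) & set(y)| as a Finset cardinality
lemma interLen_card (x y : List Int) :
    ((PySem.Set.inter (PySem.Set.ofList x) (PySem.Set.ofList y)).length : Int) =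
      ((x.toFinset ∩ y.toFinset).card : Int) := by
  congr 1
  unfold PySem.Set.inter
  rw [← List.toFinset_card_of_nodup ((PySem.Set.nodup_ofList x).filter _)]
  congr 1
  ext z
  simp [Finset.mem_inter]

lemma fA_symm (phis : List (List Int)) (i j : Nat) : fA phis i j = fA phis j i := by
  unfold fA
  rw [interLen_card, interLen_card, Finset.inter_comm]
  ring

lemma outer_char (phis : List (List Int)) (n : Nat) :
    ∀ (k : Nat), k ≤ n → ∀ (a b : Nat),
      ((List.range k).foldl
          (fun g i => (List.range' (i + 1) (n - (i + 1))).foldl (stepg phis i) g)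
          (fun _ _ => 0)) a b =
        if a ≠ b ∧ min a b < k ∧ a < n ∧ b < n then fA phis a b else 0 := by
  intro k
  induction k with
  | zero =>
    intro _ a b
    simp only [List.range_zero, List.foldl_nil]
    split_ifs <;> first | rfl | omega
  | succ k ih =>
    intro hk a b
    rw [List.range_succ, List.foldl_append]
    simp only [List.foldl_cons, List.foldl_nil]
    rw [inner_char, ih (by omega)]
    have hkn : k + 1 + (n - (k + 1)) = n := by omega
    rw [hkn]
    split_ifs <;>
      first
        | rfl
        | omega
        | (rename_i hh _; obtain ⟨rfl, -⟩ := hh; first | rfl | omega | (rw [fA_symm]))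
        | (rename_i hh _; obtain ⟨-, rfl⟩ := hh; first | rfl | omega | (rw [fA_symm]))
        | (rename_i _ hh _; obtain ⟨rfl, -⟩ := hh; first | rfl | omega | (rw [fA_symm]))
        | (rename_i _ hh _; obtain ⟨-, rfl⟩ := hh; first | rfl | omega | (rw [fA_symm]))

lemma A_fold_eq_mat (phis : List (List Int)) :
    create_alpha_matrix phis =
      mat phis.length
        ((List.range phis.length).foldl
          (fun g i => (List.range' (i + 1) (phis.length - (i + 1))).foldl (stepg phis i) g)
          (fun _ _ => 0)) := by
  have main : ∀ (L : List Nat), (∀ i ∈ L, i < phis.length) → ∀ g,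
      L.foldl (fun m row_idx1 =>
        (List.range' (row_idx1 + 1) (phis.length - (row_idx1 + 1))).foldl
          (fun m row_idx2 =>
            matSet2 (matSet2 m row_idx1 row_idx2 (fA phis row_idx1 row_idx2)) row_idx2 row_idx1
              (fA phis row_idx1 row_idx2)) m) (mat phis.length g)
      = mat phis.length (L.foldl
          (fun g i => (List.range' (i + 1) (phis.length - (i + 1))).foldl (stepg phis i) g) g) := by
    intro L
    induction L with
    | nil => intro _ g; rfl
    | cons i L ih =>
      intro hL g
      simp only [List.foldl_cons]
      rw [inner_fold_mat phis phis.length i (hL i (by simp))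
            _ (fun j hj => by simp only [List.mem_range'_1] at hj; omega),
          ih (fun x hx => hL x (by simp [hx]))]
  exact main (List.range phis.length) (fun i hi => List.mem_range.mp hi) (fun _ _ => 0)

lemma getD_map' {α β : Type} (l : List α) (f : α → β) (i : Nat) (d : β) (da : α) (hi : i < l.length) :
    (l.map f).getD i d = f (l.getD i da) := by
  rw [List.getD_eq_getElem?_getD, List.getD_eq_getElem?_getD, List.getElem?_map,
      List.getElem?_eq_getElem hi]
  simp

-- ---- B-side lemmas ----

lemma getD_lt {α : Type} (l : List α) (i : Nat) (d : α) (h : i < l.length) :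
    l.getD i d = l[i] := by
  rw [List.getD_eq_getElem?_getD, List.getElem?_eq_getElem h]
  rfl

-- the rows recorded for a value w: indices of the rows containing w, in order
def rowsOf (phis : List (List Int)) (w : Int) : List Nat :=
  ((phis.zipIdx.filter (fun pr => decide (w ∈ pr.1))).map (·.2))

lemma row_fold_getD (i : Nat) :
    ∀ (L : List Int), L.Nodup → ∀ (d : PySem.Dict Int (List Nat)) (w : Int),
      (L.foldl (fun d v => d.insert v (d.getD v [] ++ [i])) d).getD w [] =
        d.getD w [] ++ (if w ∈ L then [i] else []) := by
  intro L
  induction L with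
  | nil => intro _ d w; simp
  | cons v L ih =>
    intro hnd d w
    simp only [List.foldl_cons]
    rw [ih hnd.of_cons, PySem.Dict.getD_insert]
    by_cases hw : w = v
    · subst hw
      rw [if_pos rfl, if_neg (List.nodup_cons.mp hnd).1, if_pos (by simp)]
      simp
    · rw [if_neg hw]
      by_cases hm : w ∈ L
      · rw [if_pos hm, if_pos (by simp [hm])]
      · rw [if_neg hm, if_neg (by simp [hw, hm])]

lemma pvIndexRow_getD (d : PySem.Dict Int (List Nat)) (r : List Int) (i : Nat) (w : Int) :
    (pvIndexRow d (r, i)).getD w [] = d.getD w [] ++ (if w ∈ r then [i] else []) := by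
  unfold pvIndexRow
  rw [row_fold_getD i _ (PySem.List.nodup_dedup r) d w]
  simp [PySem.List.mem_dedup]

lemma index_fold_getD (w : Int) :
    ∀ (rest : List (List Int)) (k : Nat) (d : PySem.Dict Int (List Nat)),
      ((rest.zipIdx k).foldl pvIndexRow d).getD w [] =
        d.getD w [] ++ ((rest.zipIdx k).filter (fun pr => decide (w ∈ pr.1))).map (·.2) := by
  intro rest
  induction rest with
  | nil => intro k d; simp
  | cons r rest ih =>
    intro k d
    rw [List.zipIdx_cons]
    simp only [List.foldl_cons]
    rw [ih, pvIndexRow_getD]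
    by_cases hm : w ∈ r
    · rw [List.filter_cons_of_pos (by simpa), if_pos hm]
      simp
    · rw [List.filter_cons_of_neg (by simpa), if_neg hm]
      simp

lemma pvIndex_getD (phis : List (List Int)) (w : Int) :
    (pvIndex phis).getD w [] = rowsOf phis w := by
  unfold pvIndex rowsOf
  rw [index_fold_getD w phis 0 PySem.Dict.empty, PySem.Dict.getD_empty]
  simp

lemma rowsOf_pairwise (phis : List (List Int)) (w : Int) :
    (rowsOf phis w).Pairwise (· < ·) := by
  unfold rowsOf
  have hsub : ((phis.zipIdx.filter (fun pr => decide (w ∈ pr.1))).map (·.2)).Sublist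
      (phis.zipIdx.map (·.2)) := List.Sublist.map _ List.filter_sublist
  have : (phis.zipIdx.map (·.2)).Pairwise (· < ·) := by
    have := List.zipIdx_map_snd 0 phis
    simp only [Prod.snd] at this ⊢
    rw [this]
    exact List.pairwise_lt_range' 1
  exact this.sublist hsub

lemma mem_rowsOf (phis : List (List Int)) (w : Int) (i : Nat) :
    i ∈ rowsOf phis w ↔ i < phis.length ∧ w ∈ phis.getD i [] := by
  unfold rowsOf
  simp only [List.mem_map, List.mem_filter, decide_eq_true_eq]
  constructor
  · rintro ⟨⟨r, j⟩, ⟨hmem, hw⟩, rfl⟩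
    obtain ⟨hj, hr⟩ := List.mem_zipIdx' hmem
    refine ⟨hj, ?_⟩
    rw [getD_lt _ _ _ hj, ← hr]
    exact hw
  · rintro ⟨hi, hw⟩
    rw [getD_lt _ _ _ hi] at hw
    refine ⟨(phis[i], i), ⟨?_, hw⟩, rfl⟩
    have hlen : i < phis.zipIdx.length := by simpa using hi
    have hg : phis.zipIdx[i] = (phis[i], i) := by simp
    rw [← hg]
    exact List.getElem_mem hlen

lemma pvIndex_keys_nodup (phis : List (List Int)) : (pvIndex phis).keys.Nodup := by
  unfold pvIndex
  have : ∀ (l : List (List Int × Nat)) (d : PySem.Dict Int (List Nat)),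
      d.keys.Nodup → (l.foldl pvIndexRow d).keys.Nodup := by
    intro l
    induction l with
    | nil => intro d h; exact h
    | cons pr l ih =>
      intro d h
      simp only [List.foldl_cons]
      exact ih _ (PySem.Dict.nodup_keys_foldl_insert _ _ _ h)
  exact this _ _ PySem.Dict.nodup_keys_empty

lemma mem_pvIndex_keys (phis : List (List Int)) (w : Int)
    (h : ∃ r ∈ phis, w ∈ r) : w ∈ (pvIndex phis).keys := by
  unfold pvIndex
  have main : ∀ (rest : List (List Int)) (k : Nat) (d : PySem.Dict Int (List Nat)),
      (∃ r ∈ rest, w ∈ r) ∨ w ∈ d.keys → w ∈ ((rest.zipIdx k).foldl pvIndexRow d).keys := by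
    intro rest
    induction rest with
    | nil =>
      rintro k d (⟨r, hr, _⟩ | hd)
      · exact absurd hr (by simp)
      · simpa using hd
    | cons r rest ih =>
      intro k d hyp
      rw [List.zipIdx_cons]
      simp only [List.foldl_cons]
      apply ih
      by_cases hm : w ∈ r
      · right
        show w ∈ (pvIndexRow d (r, k)).keys
        unfold pvIndexRow
        rw [PySem.Dict.keys_foldl_insert]
        rw [PySem.Set.mem_update]
        right
        simpa [PySem.List.mem_dedup]
      · rcases hyp with ⟨r', hr', hw⟩ | hd
        · rcases List.mem_cons.mp hr' with rfl | hr'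
          · exact absurd hw hm
          · exact Or.inl ⟨r', hr', hw⟩
        · right
          show w ∈ (pvIndexRow d (r, k)).keys
          unfold pvIndexRow
          rw [PySem.Dict.keys_foldl_insert, PySem.Set.mem_update]
          exact Or.inl hd
  exact main phis 0 PySem.Dict.empty (Or.inl h)

lemma count_pvPairs (rows : List Nat) (hp : rows.Pairwise (· < ·)) (i j : Nat) :
    (pvPairs rows).count (i, j) = if i ∈ rows ∧ j ∈ rows ∧ i < j then 1 else 0 := by
  induction rows with
  | nil => simp [pvPairs]
  | cons h t ih =>
    have hall : ∀ y ∈ t, h < y := (List.pairwise_cons.mp hp).1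
    have ht : t.Pairwise (· < ·) := (List.pairwise_cons.mp hp).2
    have hnd : t.Nodup := ht.imp Nat.ne_of_lt
    unfold pvPairs
    rw [List.count_append, ih ht]
    by_cases hih : i = h
    · subst hih
      have hnotmem : i ∉ t := fun hm => absurd (hall i hm) (lt_irrefl i)
      rw [if_neg (by tauto)]
      have hmapcount : (t.map (fun y => (i, y))).count (i, j) = t.count j := by
        have hinj : Function.Injective (fun y => ((i, y) : Nat × Nat)) := by
          intro a b hab; simpa using hab
        exact List.count_map_of_injective t _ hinj j
      rw [hmapcount, List.count_eq_of_nodup hnd]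
      by_cases hj : j ∈ t
      · rw [if_pos hj, if_pos ⟨by simp, by simp [hj], hall j hj⟩]
      · have hneg : ¬(i ∈ i :: t ∧ j ∈ i :: t ∧ i < j) := by
          rintro ⟨-, hj2, hij⟩
          rcases List.mem_cons.mp hj2 with rfl | hj2
          · exact absurd hij (lt_irrefl _)
          · exact hj hj2
        rw [if_neg hj, if_neg hneg]
    · have hmapcount : (t.map (fun y => (h, y))).count (i, j) = 0 := by
        apply List.count_eq_zero.mpr
        simp only [List.mem_map, not_exists]
        rintro y ⟨-, hy⟩
        exact hih (by simpa using congrArg Prod.fst hy.symm)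
      rw [hmapcount]
      by_cases hcond : i ∈ t ∧ j ∈ t ∧ i < j
      · rw [if_pos hcond, if_pos ⟨by simp [hcond.1], by simp [hcond.2.1], hcond.2.2⟩]
      · have hneg : ¬(i ∈ h :: t ∧ j ∈ h :: t ∧ i < j) := by
          rintro ⟨hi2, hj2, hij⟩
          rcases List.mem_cons.mp hi2 with rfl | hi2
          · exact hih rfl
          · rcases List.mem_cons.mp hj2 with he | hj2
            · have hlt := hall i hi2
              omega
            · exact hcond ⟨hi2, hj2, hij⟩
        rw [if_neg hcond, if_neg hneg]

lemma pvInter_getD (vals : List (List Nat)) (q : Nat × Nat) :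
    (pvInter vals).getD q 0 = ((vals.flatMap pvPairs).count q : Int) := by
  unfold pvInter
  have main : ∀ (vs : List (List Nat)) (d : PySem.Dict (Nat × Nat) Int),
      (vs.foldl (fun d rows => (pvPairs rows).foldl (fun d p => d.insert p (d.getD p 0 + 1)) d) d).getD q 0
        = d.getD q 0 + ((vs.flatMap pvPairs).count q : Int) := by
    intro vs
    induction vs with
    | nil => intro d; simp
    | cons rows vs ih =>
      intro d
      simp only [List.foldl_cons]
      rw [ih, PySem.Dict.getD_foldl_insert_add_one, List.flatMap_cons, List.count_append]
      push_cast
      ring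
  rw [main, PySem.Dict.getD_empty]
  simp

lemma count_flatMap_rows (phis : List (List Int)) (a b : Nat)
    (hab : a < b) (hbn : b < phis.length) :
    ∀ (K : List Int),
      ((K.map (rowsOf phis)).flatMap pvPairs).count (a, b) =
        K.countP (fun w => decide (w ∈ phis.getD a [] ∧ w ∈ phis.getD b [])) := by
  intro K
  induction K with
  | nil => simp
  | cons w K ih =>
    simp only [List.map_cons, List.flatMap_cons, List.count_append, List.countP_cons]
    rw [ih, count_pvPairs _ (rowsOf_pairwise phis w)]
    simp only [mem_rowsOf]
    by_cases hc : w ∈ phis.getD a [] ∧ w ∈ phis.getD b []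
    · rw [if_pos ⟨⟨by omega, hc.1⟩, ⟨hbn, hc.2⟩, hab⟩, if_pos (by simpa using hc)]
      omega
    · rw [if_neg (by tauto), if_neg (by simpa using hc)]
      omega

lemma final_count (phis : List (List Int)) (a b : Nat)
    (hab : a < b) (hbn : b < phis.length) :
    (((pvIndex phis).values.flatMap pvPairs).count (a, b) : Int) =
      ((PySem.Set.inter (PySem.Set.ofList (phis.getD a []))
          (PySem.Set.ofList (phis.getD b []))).length : Int) := by
  have han : a < phis.length := lt_trans hab hbn
  have hvals : (pvIndex phis).values = (pvIndex phis).keys.map (fun w => (pvIndex phis).getD w []) :=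
    PySem.Dict.values_eq_map_keys _ (pvIndex_keys_nodup phis) []
  have hvals2 : (pvIndex phis).values = (pvIndex phis).keys.map (rowsOf phis) := by
    rw [hvals]
    exact List.map_congr_left (fun w _ => pvIndex_getD phis w)
  rw [hvals2, count_flatMap_rows phis a b hab hbn, interLen_card]
  congr 1
  set p : Int → Bool := fun w => decide (w ∈ phis.getD a [] ∧ w ∈ phis.getD b []) with hp
  have hsupp : ∀ w, p w = true → w ∈ (pvIndex phis).keys := by
    intro w hw
    simp only [hp, decide_eq_true_eq] at hw
    apply mem_pvIndex_keys
    refine ⟨phis.getD a [], ?_, hw.1⟩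
    rw [List.getD_eq_getElem?_getD, List.getElem?_eq_getElem han]
    exact List.getElem_mem han
  rw [List.countP_eq_length_filter,
      ← List.toFinset_card_of_nodup ((pvIndex_keys_nodup phis).filter p)]
  congr 1
  ext z
  simp only [List.mem_toFinset, List.mem_filter, Finset.mem_inter, List.mem_toFinset, hp,
    decide_eq_true_eq, getD_lt _ _ _ han, getD_lt _ _ _ hbn]
  constructor
  · rintro ⟨-, hz⟩
    exact hz
  · intro hz
    refine ⟨?_, hz⟩
    apply mem_pvIndex_keys
    exact ⟨phis[a], List.getElem_mem han, hz.1⟩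

-- ===== VERDICT (by name: the statement is the Claim_ definition above) =====
theorem create_alpha_matrix_spec : Claim_equal_create_alpha_matrix := by
  intro phis _
  unfold Spec_create_alpha_matrix
  rw [A_fold_eq_mat]
  show _ = mat phis.length (fun i j =>
      if i = j then 0
      else (phis.map (fun row => (row.length : Int))).getD i 0 +
            (phis.map (fun row => (row.length : Int))).getD j 0 -
            (pvInter (pvIndex phis).values).getD (min i j, max i j) 0)
  apply mat_congr
  intro a b ha hb
  rw [outer_char phis phis.length phis.length (le_refl _) a b]
  by_cases h : a = b
  · simp [h]
  · rw [if_pos ⟨h, by omega, ha, hb⟩, if_neg h,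
        getD_map' _ _ _ _ [] ha, getD_map' _ _ _ _ [] hb, pvInter_getD]
    rcases Nat.lt_or_ge a b with hlt | hge
    · rw [Nat.min_eq_left (le_of_lt hlt), Nat.max_eq_right (le_of_lt hlt),
          final_count phis a b hlt hb]
      rfl
    · have hlt : b < a := by omega
      rw [Nat.min_eq_right (le_of_lt hlt), Nat.max_eq_left (le_of_lt hlt),
          final_count phis b a hlt ha, fA_symm]
      unfold fA
      ring
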